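-- pv_equiv track=rewrite | github.com/thirupathireddy665/crossbeam | src_training/bustle_generated_properties.py | is_contains_comma
-- ===== SOURCE A (Python) =====
-- AllTrue = -1
--
-- Mixed = 0
--
-- AllFalse = 1
--
-- def is_contains_comma(inputs):
--     is_true_present = False
--     is_false_present = False
--     for program_input in inputs:
--         if "," in program_input:
--             is_true_present = True
--         else:
--             is_false_present = True
--
--     if is_true_present and is_false_present:
--         return Mixed
--     elif is_true_present:
--         return AllTrue
--     else:
--         return AllFalse
-- ===== SOURCE B (Python) =====
-- AllTrue = -1
-- Mixed = 0
-- AllFalse = 1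
--
-- def is_contains_comma(inputs):
--     if not inputs:
--         return AllFalse
--     first = "," in inputs[0]
--     for x in inputs[1:]:
--         if ("," in x) != first:
--             return Mixed
--     return AllTrue if first else AllFalse
-- ===== Notes on version B (the rewrite author's own statement) =====
-- stated objective: alternative
-- what changed: Anchors on the first element's comma flag and scans the rest with an early exit returning Mixed at the first disagreement, instead of A's full-pass accumulation of two booleans classified afterwards.
import Mathlib
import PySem

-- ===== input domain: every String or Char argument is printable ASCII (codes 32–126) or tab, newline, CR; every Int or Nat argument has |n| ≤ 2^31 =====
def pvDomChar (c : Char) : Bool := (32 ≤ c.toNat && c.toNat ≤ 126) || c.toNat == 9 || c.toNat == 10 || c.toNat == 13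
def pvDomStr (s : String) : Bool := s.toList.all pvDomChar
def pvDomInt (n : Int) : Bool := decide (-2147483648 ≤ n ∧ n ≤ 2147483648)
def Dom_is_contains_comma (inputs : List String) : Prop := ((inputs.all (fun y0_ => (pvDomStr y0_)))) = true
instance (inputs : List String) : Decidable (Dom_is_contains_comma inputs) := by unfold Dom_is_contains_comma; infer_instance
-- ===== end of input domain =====

-- B anchors on the first element's comma flag and scans the rest with an early exit at the
-- first disagreement, instead of A's full-pass dual-boolean accumulation (objective: alternative).

-- ===== PORT A =====
-- A: loop updating two booleans, then a three-way branch.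
def is_contains_comma (inputs : List String) : Int :=
  let st := inputs.foldl
    (fun (st : Bool × Bool) program_input =>
      if PySem.Str.isIn "," program_input then (true, st.2) else (st.1, true))
    (false, false)
  if st.1 && st.2 then 0
  else if st.1 then -1
  else 1

-- ===== PORT B =====
-- B's early-exit scan of the tail against the anchored first flag.
def pvScanB (first : Bool) : List String → Int
  | [] => if first then -1 else 1
  | x :: xs => if (PySem.Str.isIn "," x) != first then 0 else pvScanB first xs

-- B: empty → AllFalse; else anchor first flag, early-exit scan of the rest.
def is_contains_comma_alt (inputs : List String) : Int :=
  match inputs with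
  | [] => 1
  | hd :: tl => pvScanB (PySem.Str.isIn "," hd) tl

-- ===== PRECONDITION & SPEC =====
def Spec_is_contains_comma (inputs : List String) (out : Int) : Prop := out = is_contains_comma_alt inputs
instance (inputs : List String) (out : Int) : Decidable (Spec_is_contains_comma inputs out) := by unfold Spec_is_contains_comma; infer_instance

-- ===== CLAIM (what is proved, stated in full; the proofs are below) =====
def Claim_equal_is_contains_comma : Prop := ∀ (inputs : List String), Dom_is_contains_comma inputs → Spec_is_contains_comma inputs (is_contains_comma inputs)

-- ===== LEMMAS AND PROOFS =====

-- A's fold accumulates exactly "some element has a comma" / "some element lacks one".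
theorem pvFoldA (inputs : List String) (t f : Bool) :
    inputs.foldl
      (fun (st : Bool × Bool) x =>
        if PySem.Str.isIn "," x then (true, st.2) else (st.1, true))
      (t, f)
    = (t || inputs.any (fun x => PySem.Str.isIn "," x),
       f || inputs.any (fun x => !PySem.Str.isIn "," x)) := by
  induction inputs generalizing t f with
  | nil => simp
  | cons hd tl ih =>
    rw [List.foldl_cons, List.any_cons, List.any_cons]
    by_cases h : PySem.Str.isIn "," hd = true
    · rw [if_pos h, ih, h]; simp
    · rw [if_neg h, ih]
      simp only [Bool.not_eq_true] at h
      rw [h]; simp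

-- B's scan returns 0 iff some tail element disagrees with the anchor, else classifies the anchor.
theorem pvScanB_eq (first : Bool) (xs : List String) :
    pvScanB first xs
    = if xs.any (fun x => PySem.Str.isIn "," x != first) then 0
      else if first then -1 else 1 := by
  induction xs with
  | nil => simp [pvScanB]
  | cons hd tl ih =>
    rw [pvScanB, List.any_cons]
    by_cases h : (PySem.Str.isIn "," hd != first) = true
    · rw [if_pos h, h]; simp
    · rw [if_neg h, ih]
      have h' : PySem.Chars.isIn [','] hd.toList = first := by
        simpa [PySem.Str.isIn] using h
      simp [h']

-- ===== VERDICT (by name: the statement is the Claim_ definition above) =====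
theorem is_contains_comma_spec : Claim_equal_is_contains_comma := by
  intro inputs _
  unfold Spec_is_contains_comma
  cases inputs with
  | nil => simp [is_contains_comma, is_contains_comma_alt]
  | cons hd tl =>
    simp only [is_contains_comma, is_contains_comma_alt]
    rw [pvFoldA, pvScanB_eq]
    by_cases h : PySem.Chars.isIn [','] hd.toList = true
    · simp [h]
    · simp only [Bool.not_eq_true] at h
      simp [h]
      split_ifs <;> rfl
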